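-- pv_equiv track=rewrite | github.com/hhwjj/forgit | quiz/함수/1065.py | arith
-- ===== SOURCE A (Python) =====
-- def arith(n:str):
--     scnt=0
--     b=set()
--     c=len(n)-1
--     for k in range(c) :
--         c=int(n[k+1])-int(n[k])
--         b.add(c)
--     if len(b) ==1:
--         scnt+=1
--     return scnt
-- ===== SOURCE B (Python) =====
-- def arith(n: str):
--     # Reconstruct the unique candidate arithmetic digit sequence from the first two
--     # digits (closed form a + k*d) and compare it with the parsed digits, instead of
--     # scanning consecutive differences.
--     if len(n) < 2:
--         return 0
--     digits = [int(c) for c in n]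
--     a = digits[0]
--     d = digits[1] - a
--     return 1 if digits == [a + k * d for k in range(len(digits))] else 0
-- ===== Notes on version B (the rewrite author's own statement) =====
-- stated objective: alternative
-- what changed: B parses the digits once and compares them with the closed-form affine reconstruction [a + k*d] built from the first two digits, instead of accumulating the set of all consecutive differences and testing its cardinality.
import Mathlib
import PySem

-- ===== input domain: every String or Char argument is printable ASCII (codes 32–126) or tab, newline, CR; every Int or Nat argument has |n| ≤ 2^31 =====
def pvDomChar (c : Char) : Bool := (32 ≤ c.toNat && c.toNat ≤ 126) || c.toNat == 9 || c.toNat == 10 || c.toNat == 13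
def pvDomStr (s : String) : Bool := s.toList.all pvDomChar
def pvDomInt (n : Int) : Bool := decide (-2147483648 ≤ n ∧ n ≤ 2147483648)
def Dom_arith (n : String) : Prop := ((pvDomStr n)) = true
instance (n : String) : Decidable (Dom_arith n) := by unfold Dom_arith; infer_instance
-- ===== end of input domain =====

-- One honest line: B compares the parsed digits with the closed-form affine
-- reconstruction a + k*d built from the first two digits, instead of A's set of all
-- consecutive differences tested by cardinality.

-- int(n[k]): exact wherever Python's int(n[k]) returns (the .getD 0 is only reached
-- where Python raises, which Pre_arith excludes).
def pyIntAt (n : String) (i : Int) : Int :=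
  ((PySem.Str.pyGet? n i).bind (fun c => PySem.Int.ofChars? [c])).getD 0

-- ===== PORT A =====
def arith (n : String) : Int :=
  let scnt : Int := 0
  let b : PySem.Set Int := PySem.Set.empty
  let c : Int := PySem.Str.len n - 1
  let b := (PySem.List.pyRange 0 c 1).foldl
    (fun b k => PySem.Set.add b (pyIntAt n (k + 1) - pyIntAt n k)) b
  let scnt := if b.length = 1 then scnt + 1 else scnt
  scnt

-- ===== PORT B =====
-- int(c) for a single character c
def digitVal (c : Char) : Int := (PySem.Int.ofChars? [c]).getD 0

def arith_alt (n : String) : Int :=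
  if PySem.Str.len n < 2 then 0
  else
    let digits : List Int := n.toList.map digitVal
    let a : Int := digits.getD 0 0
    let d : Int := digits.getD 1 0 - a
    if digits = (PySem.List.pyRange 0 (PySem.List.len digits) 1).map (fun k => a + k * d)
    then 1 else 0

-- ===== PRECONDITION & SPEC =====
-- Python's int(n[k]) raises ValueError on any non-digit character; the loop touches
-- characters only when len(n) ≥ 2, so A returns exactly on these inputs.
def Pre_arith (n : String) : Prop := n.toList.length < 2 ∨ n.toList.all (fun c => c.isDigit) = true
instance (n : String) : Decidable (Pre_arith n) := by unfold Pre_arith; infer_instance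
def pvWitness_arith : String := "1357"
def Spec_arith (n : String) (out : Int) : Prop := out = arith_alt n
instance (n : String) (out : Int) : Decidable (Spec_arith n out) := by unfold Spec_arith; infer_instance

-- ===== CLAIM (what is proved, stated in full; the proofs are below) =====
def Claim_equal_arith : Prop := ∀ (n : String), Dom_arith n → Pre_arith n → Spec_arith n (arith n)

-- ===== LEMMAS AND PROOFS =====

-- adding elements never shrinks a PySem.Set
theorem length_le_foldl_add {s : PySem.Set Int} {l : List Int} :
    s.length ≤ (l.foldl PySem.Set.add s).length := by
  induction l generalizing s with
  | nil => exact le_rfl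
  | cons x xs ih =>
      refine le_trans ?_ (ih (s := PySem.Set.add s x))
      simp [PySem.Set.add]
      split <;> simp

-- the set built from a ∷ l is a singleton iff every element of l equals a
theorem foldl_add_singleton_iff (a : Int) (l : List Int) :
    (l.foldl PySem.Set.add [a]).length = 1 ↔ ∀ x ∈ l, x = a := by
  induction l with
  | nil => simp
  | cons x xs ih =>
      by_cases hx : x = a
      · subst hx
        simpa [PySem.Set.add, PySem.Set.contains] using ih
      · simp only [List.foldl_cons, List.mem_cons]
        have hadd : PySem.Set.add [a] x = [a, x] := by
          simp [PySem.Set.add, PySem.Set.contains, hx]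
        rw [hadd]
        constructor
        · intro h
          exfalso
          have hle := length_le_foldl_add (s := ([a, x] : PySem.Set Int)) (l := xs)
          simp only [List.length_cons, List.length_nil] at hle
          omega
        · intro h
          exact absurd (h x (Or.inl rfl)) hx

-- 'all consecutive differences equal the first one' ↔ 'the sequence is affine'
theorem affine_iff (w : Nat → Int) (L : Nat) :
    (∀ i : Nat, i + 1 < L → w (i + 1) - w i = w 1 - w 0) ↔
    (∀ j : Nat, j < L → w j = w 0 + (j : Int) * (w 1 - w 0)) := by
  constructor
  · intro h j hj
    induction j with
    | zero => simp
    | succ m ih =>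
        have hm := h m hj
        have hm2 := ih (by omega)
        push_cast
        linear_combination hm + hm2
  · intro h i hi
    have h1 := h i (by omega)
    have h2 := h (i + 1) hi
    rw [h1, h2]
    push_cast
    ring

-- int(n[j]) is the j-th parsed digit
theorem pyIntAt_eq (n : String) (j : Nat) (hj : j < n.toList.length) :
    pyIntAt n (j : Int) = (n.toList.map digitVal).getD j 0 := by
  simp [pyIntAt, digitVal, List.getElem?_eq_getElem hj]


-- the two programs' success conditions agree (len ≥ 2)
theorem conditions_iff (n : String) (hL2 : 2 ≤ n.toList.length) :
    (∀ x ∈ (PySem.List.pyRange 1 ((n.toList.length : Int) - 1) 1).map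
        (fun k => pyIntAt n (k + 1) - pyIntAt n k),
      x = pyIntAt n (0 + 1) - pyIntAt n 0) ↔
    (n.toList.map digitVal = (PySem.List.pyRange 0 (n.toList.length : Int) 1).map
        (fun k => (n.toList.map digitVal).getD 0 0 +
          k * ((n.toList.map digitVal).getD 1 0 - (n.toList.map digitVal).getD 0 0))) := by
  set ds : List Int := n.toList.map digitVal with hds
  set L : Nat := n.toList.length with hL
  have hdsl : ds.length = L := by simp [hds, hL]
  have hw : ∀ j : Nat, j < L → pyIntAt n (j : Int) = ds.getD j 0 := fun j hj => pyIntAt_eq n j hj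
  rw [List.forall_mem_map]
  have lhs_iff :
      (∀ k ∈ PySem.List.pyRange 1 ((L : Int) - 1) 1,
        pyIntAt n (k + 1) - pyIntAt n k = pyIntAt n (0 + 1) - pyIntAt n 0) ↔
      (∀ i : Nat, i + 1 < L → ds.getD (i + 1) 0 - ds.getD i 0 = ds.getD 1 0 - ds.getD 0 0) := by
    constructor
    · intro h i hi
      rcases Nat.eq_zero_or_pos i with h0 | h0
      · subst h0; norm_num
      · have := h (i : Int) (by rw [PySem.List.mem_pyRange_one]; omega)
        rw [show ((i : Int) + 1) = ((i + 1 : Nat) : Int) by push_cast; ring,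
          hw (i + 1) (by omega), hw i (by omega),
          show ((0 : Int) + 1) = ((1 : Nat) : Int) by norm_num,
          hw 1 (by omega), show (0 : Int) = ((0 : Nat) : Int) by norm_num,
          hw 0 (by omega)] at this
        exact this
    · intro h k hk
      rw [PySem.List.mem_pyRange_one] at hk
      have hk0 : 0 ≤ k := by omega
      obtain ⟨i, rfl⟩ : ∃ i : Nat, k = (i : Int) := ⟨k.toNat, (Int.toNat_of_nonneg hk0).symm⟩
      rw [show ((i : Int) + 1) = ((i + 1 : Nat) : Int) by push_cast; ring,
        hw (i + 1) (by omega), hw i (by omega),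
        show ((0 : Int) + 1) = ((1 : Nat) : Int) by norm_num,
        hw 1 (by omega), show (0 : Int) = ((0 : Nat) : Int) by norm_num,
        hw 0 (by omega)]
      exact h i (by omega)
  have rhs_iff :
      (ds = (PySem.List.pyRange 0 (L : Int) 1).map
          (fun k => ds.getD 0 0 + k * (ds.getD 1 0 - ds.getD 0 0))) ↔
      (∀ j : Nat, j < L → ds.getD j 0 = ds.getD 0 0 + (j : Int) * (ds.getD 1 0 - ds.getD 0 0)) := by
    rw [PySem.List.pyRange_one]
    constructor
    · intro h j hj
      rw [List.getD_eq_getElem?_getD]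
      conv_lhs => rw [h]
      simp [hj]
    · intro h
      apply List.ext_getElem
      · simp [hdsl]
      · intro j hj hj2
        have hjL : j < L := by rwa [hdsl] at hj
        have := h j hjL
        rw [List.getD_eq_getElem _ _ (by omega)] at this
        simp only [List.getElem_map, List.getElem_range]
        rw [this]
        ring
  rw [lhs_iff, rhs_iff]
  exact affine_iff (fun j => ds.getD j 0) L

-- ===== VERDICT (by name: the statement is the Claim_ definition above) =====
theorem arith_spec : Claim_equal_arith := by
  intro n _ _
  unfold Spec_arith arith arith_alt
  simp only [PySem.Str.len_eq, PySem.List.len_eq, List.length_map]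
  by_cases h2 : ((n.toList.length : Int)) < 2
  · have hnil : PySem.List.pyRange 0 ((n.toList.length : Int) - 1) 1 = [] :=
      PySem.List.pyRange_one_eq_nil (by omega)
    simp only [hnil, List.foldl_nil, PySem.Set.empty]
    rw [if_pos h2]
    norm_num
  · -- len ≥ 2
    have hL2 : 2 ≤ n.toList.length := by exact_mod_cast not_lt.mp h2
    simp only [h2, if_false]
    have hcons : PySem.List.pyRange 0 ((n.toList.length : Int) - 1) 1
        = 0 :: PySem.List.pyRange 1 ((n.toList.length : Int) - 1) 1 :=
      PySem.List.pyRange_one_cons (by omega)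
    have hadd : PySem.Set.add (PySem.Set.empty : PySem.Set Int)
        (pyIntAt n (0 + 1) - pyIntAt n 0) = [pyIntAt n (0 + 1) - pyIntAt n 0] := by
      simp [PySem.Set.add, PySem.Set.empty, PySem.Set.contains]
    have hfold : ∀ (s : PySem.Set Int) (l : List Int),
        l.foldl (fun b k => PySem.Set.add b (pyIntAt n (k + 1) - pyIntAt n k)) s
          = (l.map (fun k => pyIntAt n (k + 1) - pyIntAt n k)).foldl PySem.Set.add s := by
      intro s l
      induction l generalizing s with
      | nil => rfl
      | cons x xs ih => simp [ih]
    simp only [hfold]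
    simp only [hcons, List.map_cons, List.foldl_cons, hadd, foldl_add_singleton_iff,
      conditions_iff n hL2]
    norm_num
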